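-- pv_equiv track=rewrite | github.com/derrickkim0109/BaekJoon_Algorithm | 백준/Silver/22857. 가장 긴 짝수 연속한 부분 수열 （small）/가장 긴 짝수 연속한 부분 수열 （small）.py | longest_even_subsequence
-- ===== SOURCE A (Python) =====
-- def longest_even_subsequence(N, K, S):
--     left = 0
--     max_length = 0
--     odd_count = 0
--
--     for right in range(N):
--         if S[right] % 2 != 0:
--             odd_count += 1
--
--         while odd_count > K:
--             if S[left] % 2 != 0:
--                 odd_count -= 1
--             left += 1
--
--         # 현재 부분 수열에서 짝수만의 길이를 계산
--         even_length = right - left + 1 - odd_count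
--         max_length = max(max_length, even_length)
--
--     return max_length
-- ===== SOURCE B (Python) =====
-- def longest_even_subsequence(N, K, S):
--     if N <= 0:
--         return 0
--     odds = [i for i in range(N) if S[i] % 2 != 0]
--     m = len(odds)
--     if m <= K:
--         return N - m
--     pos = [-1] + odds + [N]
--     best = 0
--     for i in range(m - K + 1):
--         best = max(best, pos[i + K + 1] - pos[i] - 1 - K)
--     return best
-- ===== Notes on version B (the rewrite author's own statement) =====
-- stated objective: alternative
-- what changed: A's two-pointer sliding window with a running odd counter is replaced by building the list of odd-element indices once and maximising a closed-form even-count formula over the windows delimited by K+1 consecutive odd positions (sentinel-padded).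
-- outside the precondition, e.g. on longest_even_subsequence(1, -2, [-3, 3, 2, -1, 0]): A returns 0, B raises IndexError; on longest_even_subsequence(2, -1, [1, 2, 3]): A returns 0, B returns 0
import Mathlib
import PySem

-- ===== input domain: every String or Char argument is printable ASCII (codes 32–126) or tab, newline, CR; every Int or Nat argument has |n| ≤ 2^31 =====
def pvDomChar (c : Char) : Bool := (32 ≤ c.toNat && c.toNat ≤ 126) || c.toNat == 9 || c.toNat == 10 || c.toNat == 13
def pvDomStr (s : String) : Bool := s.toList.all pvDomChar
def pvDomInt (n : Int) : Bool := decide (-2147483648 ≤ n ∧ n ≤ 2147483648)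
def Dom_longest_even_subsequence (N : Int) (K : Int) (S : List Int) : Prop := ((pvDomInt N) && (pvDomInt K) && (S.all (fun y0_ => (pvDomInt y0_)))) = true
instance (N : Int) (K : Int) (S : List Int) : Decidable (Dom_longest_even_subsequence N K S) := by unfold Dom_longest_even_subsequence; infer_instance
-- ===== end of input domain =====

-- B replaces A's two-pointer sliding window by a one-pass odds-index list plus a closed
-- window formula over it (different decomposition, same exact return value on Pre_).

-- ===== PORT A =====
-- the inner `while odd_count > K` loop; fuel (S.length+1) bounds the iterations Python can
-- make before raising IndexError; the `none` branch is Python's IndexError (outside Pre_)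
def aWhile (S : List Int) (K : Int) : Nat → Int → Int → Int × Int
  | 0, left, oddCount => (left, oddCount)
  | fuel+1, left, oddCount =>
    if K < oddCount then
      match PySem.List.pyGet? S left with
      | none => (left, oddCount)
      | some v => aWhile S K fuel (left + 1) (if PySem.Int.mod v 2 ≠ 0 then oddCount - 1 else oddCount)
    else (left, oddCount)

-- one iteration of the `for right in range(N)` loop; state = (left, max_length, odd_count)
def aStep (S : List Int) (K : Int) (st : Int × Int × Int) (right : Int) : Int × Int × Int :=
  let oc := match PySem.List.pyGet? S right with
    | none => st.2.2   -- Python raises IndexError here (outside Pre_)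
    | some v => if PySem.Int.mod v 2 ≠ 0 then st.2.2 + 1 else st.2.2
  let w := aWhile S K (S.length + 1) st.1 oc
  (w.1, max st.2.1 (right - w.1 + 1 - w.2), w.2)

def longest_even_subsequence (N : Int) (K : Int) (S : List Int) : Int :=
  ((PySem.List.pyRange 0 N 1).foldl (aStep S K) (0, 0, 0)).2.1

-- ===== PORT B =====
-- odds = [i for i in range(N) if S[i] % 2 != 0]  (pyGetD's default only reached where Python raises, outside Pre_)
def altOdds (N : Int) (S : List Int) : List Int :=
  (PySem.List.pyRange 0 N 1).filter (fun i => PySem.Int.mod (PySem.List.pyGetD S i 0) 2 != 0)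

def longest_even_subsequence_alt (N : Int) (K : Int) (S : List Int) : Int :=
  if N ≤ 0 then 0
  else
    let odds := altOdds N S
    let m : Int := odds.length
    if m ≤ K then N - m
    else
      let pos : List Int := -1 :: (odds ++ [N])
      (PySem.List.pyRange 0 (m - K + 1) 1).foldl
        (fun best i => max best (PySem.List.pyGetD pos (i + K + 1) 0 - PySem.List.pyGetD pos i 0 - 1 - K)) 0

-- ===== PRECONDITION & SPEC =====
-- Pre_ excludes N > len(S) (A raises IndexError) and negative K with N ≥ 1 (a negative
-- bound is outside the task's natural domain: A's while loop then drains past the window,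
-- raising IndexError on some inputs, and B likewise raises on part of that region).
def Pre_longest_even_subsequence (N : Int) (K : Int) (S : List Int) : Prop :=
  N ≤ (S.length : Int) ∧ (0 ≤ K ∨ N ≤ 0)
instance (N : Int) (K : Int) (S : List Int) : Decidable (Pre_longest_even_subsequence N K S) := by
  unfold Pre_longest_even_subsequence; infer_instance
def pvWitness_longest_even_subsequence : Int × Int × List Int := (3, 1, [2, 1, 4])

def Spec_longest_even_subsequence (N : Int) (K : Int) (S : List Int) (out : Int) : Prop := out = longest_even_subsequence_alt N K S
instance (N : Int) (K : Int) (S : List Int) (out : Int) : Decidable (Spec_longest_even_subsequence N K S out) := by unfold Spec_longest_even_subsequence; infer_instance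

-- ===== CLAIM (what is proved, stated in full; the proofs are below) =====
def Claim_equal_longest_even_subsequence : Prop := ∀ (N : Int) (K : Int) (S : List Int), Dom_longest_even_subsequence N K S → Pre_longest_even_subsequence N K S → Spec_longest_even_subsequence N K S (longest_even_subsequence N K S)

-- ===== LEMMAS AND PROOFS =====

def pOdd (v : Int) : Bool := PySem.Int.mod v 2 != 0

-- indices of the odd entries among S[0..n-1]
def oddsN (S : List Int) : Nat → List Int
  | 0 => []
  | n+1 => oddsN S n ++ (if pOdd (S.getD n 0) then [((n : Nat) : Int)] else [])

def posL (q : List Int) (B : Int) : List Int := -1 :: (q ++ [B])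
def wfun (q : List Int) (B K : Int) (i : Int) : Int :=
  PySem.List.pyGetD (posL q B) (i + K + 1) 0 - PySem.List.pyGetD (posL q B) i 0 - 1 - K
def wmax (q : List Int) (B K : Int) : Int :=
  (PySem.List.pyRange 0 ((q.length : Int) - K + 1) 1).foldl (fun b i => max b (wfun q B K i)) 0
def bspec (S : List Int) (K : Int) (n : Nat) : Int :=
  if ((oddsN S n).length : Int) ≤ K then (n : Int) - (oddsN S n).length
  else wmax (oddsN S n) (n : Int) K
def Lsp (q : List Int) (K : Int) : Int :=
  if (q.length : Int) ≤ K then 0 else PySem.List.pyGetD q ((q.length : Int) - K - 1) 0 + 1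
def Csp (q : List Int) (K : Int) : Int := min (q.length : Int) K

lemma altOdds_eq (S : List Int) (n : Nat) : altOdds (n : Int) S = oddsN S n := by
  induction n with
  | zero => simp [altOdds, oddsN, PySem.List.pyRange_one_eq_nil]
  | succ n ih =>
    have h : ((n + 1 : Nat) : Int) = (n : Int) + 1 := by push_cast; ring
    rw [altOdds, h, PySem.List.pyRange_one_succ_right (by positivity), List.filter_append]
    rw [altOdds] at ih
    rw [ih, oddsN]
    congr 1
    rcases Int.emod_two_eq_zero_or_one (S[n]?.getD 0) with h2 | h2 <;>
      simp [pOdd, List.filter, List.getD, h2]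

lemma alt_eq_bspec (S : List Int) (K : Int) (n : Nat) (hn : 0 < n) :
    longest_even_subsequence_alt (n : Int) K S = bspec S K n := by
  simp only [longest_even_subsequence_alt, altOdds_eq, bspec, wmax, wfun, posL]
  rw [if_neg (by omega : ¬ ((n : Int) ≤ 0))]

lemma mem_oddsN (S : List Int) (n : Nat) (x : Int) :
    x ∈ oddsN S n ↔ ∃ j : Nat, j < n ∧ pOdd (S.getD j 0) = true ∧ x = (j : Int) := by
  induction n with
  | zero => simp [oddsN]
  | succ n ih =>
    rw [oddsN, List.mem_append, ih]
    constructor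
    · rintro (⟨j, hj, ho, hx⟩ | hmem)
      · exact ⟨j, by omega, ho, hx⟩
      · refine ⟨n, by omega, ?_, ?_⟩ <;>
        · split at hmem <;> simp_all
    · rintro ⟨j, hj, ho, hx⟩
      by_cases hjn : j < n
      · exact Or.inl ⟨j, hjn, ho, hx⟩
      · have : j = n := by omega
        subst this
        right; rw [if_pos ho]; simp [hx]

lemma oddsN_lt (S : List Int) (n : Nat) : ∀ x ∈ oddsN S n, 0 ≤ x ∧ x < (n : Int) := by
  intro x hx
  rw [mem_oddsN] at hx
  obtain ⟨j, hj, -, rfl⟩ := hx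
  constructor <;> [positivity; exact_mod_cast hj]

lemma oddsN_sorted (S : List Int) (n : Nat) : (oddsN S n).Pairwise (· < ·) := by
  induction n with
  | zero => simp [oddsN]
  | succ n ih =>
    rw [oddsN]
    apply List.pairwise_append.mpr
    refine ⟨ih, ?_, ?_⟩
    · split <;> simp
    · intro x hx y hy
      have hxn := (oddsN_lt S n x hx).2
      split at hy <;> simp_all

lemma aWhile_noop (S : List Int) (K : Int) (fuel : Nat) (l oc : Int) (h : oc ≤ K) :
    aWhile S K fuel l oc = (l, oc) := by
  cases fuel with
  | zero => rfl
  | succ fuel => rw [aWhile]; rw [if_neg (by omega)]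


lemma oddsN_length_le (S : List Int) (n : Nat) : (oddsN S n).length ≤ n := by
  induction n with
  | zero => simp [oddsN]
  | succ n ih => rw [oddsN]; split <;> simp <;> omega

lemma pyGetD_append_left_int (l t : List Int) (i : Int) (h0 : 0 ≤ i) (h : i < (l.length : Int)) :
    PySem.List.pyGetD (l ++ t) i 0 = PySem.List.pyGetD l i 0 := by
  rw [PySem.List.pyGetD_eq_getElem (l ++ t) 0 h0 (by simp; omega),
      PySem.List.pyGetD_eq_getElem l 0 h0 (by exact_mod_cast h)]
  exact List.getElem_append_left (by omega)

lemma posL_zero (q : List Int) (B : Int) : PySem.List.pyGetD (posL q B) 0 0 = -1 := by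
  simp [posL, PySem.List.pyGetD_zero_cons]

lemma posL_succ (q : List Int) (B : Int) (j : Nat) (hj : j < q.length) :
    PySem.List.pyGetD (posL q B) ((j : Int) + 1) 0 = q.getD j 0 := by
  have h1 : ((j : Int) + 1) = ((j + 1 : Nat) : Int) := by push_cast; ring
  rw [h1, PySem.List.pyGetD_natCast]
  have h2 : (q ++ [B])[j]? = some q[j] := by
    rw [List.getElem?_append_left hj, List.getElem?_eq_getElem hj]
  simp [posL, List.getD, h2]
  rw [List.getElem?_eq_getElem hj]; rfl

lemma posL_last (q : List Int) (B : Int) :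
    PySem.List.pyGetD (posL q B) ((q.length : Int) + 1) 0 = B := by
  have h1 : ((q.length : Int) + 1) = ((q.length + 1 : Nat) : Int) := by omega
  rw [h1, PySem.List.pyGetD_natCast]
  simp [posL]

lemma foldl_max_congr (l : List Int) (f g : Int → Int) (c : Int)
    (h : ∀ x ∈ l, f x = g x) :
    l.foldl (fun b i => max b (f i)) c = l.foldl (fun b i => max b (g i)) c := by
  induction l generalizing c with
  | nil => rfl
  | cons x xs ih =>
    simp only [List.foldl_cons]
    rw [h x (by simp), ih _ (fun y hy => h y (by simp [hy]))]

lemma wmax_split (q : List Int) (B K : Int) (_hK : 0 ≤ K) (hKm : K ≤ (q.length : Int)) :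
    wmax q B K = max ((PySem.List.pyRange 0 ((q.length : Int) - K) 1).foldl
        (fun b i => max b (wfun q B K i)) 0) (wfun q B K ((q.length : Int) - K)) := by
  rw [wmax, PySem.List.pyRange_one_succ_right (by omega), List.foldl_append]
  simp

lemma wfun_congr (q : List Int) (B B' K : Int) (i : Int) (_hK : 0 ≤ K)
    (h0 : 0 ≤ i) (h : i + K + 1 ≤ (q.length : Int)) :
    wfun q B K i = wfun q B' K i := by
  unfold wfun
  have e : ∀ C : Int, posL q C = (-1 :: q) ++ [C] := by intro C; simp [posL]
  rw [e B, e B', pyGetD_append_left_int _ _ _ (by omega) (by simp; omega),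
      pyGetD_append_left_int _ _ _ h0 (by simp; omega),
      pyGetD_append_left_int _ _ _ (by omega) (by simp; omega),
      pyGetD_append_left_int _ _ _ h0 (by simp; omega)]

lemma wfun_snoc (q : List Int) (a B K : Int) (i : Int) (_hK : 0 ≤ K)
    (h0 : 0 ≤ i) (h : i + K + 1 ≤ (q.length : Int) + 1) :
    wfun (q ++ [a]) B K i = wfun q a K i := by
  unfold wfun
  have e : posL (q ++ [a]) B = posL q a ++ [B] := by simp [posL]
  have hlen : ((posL q a).length : Int) = (q.length : Int) + 2 := by simp [posL]; omega
  rw [e, pyGetD_append_left_int _ _ _ (by omega) (by omega),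
      pyGetD_append_left_int _ _ _ h0 (by omega)]

lemma sorted_getElem_le (q : List Int) (h : q.Pairwise (· < ·)) (i j : Nat)
    (hi : i < q.length) (hj : j < q.length) (hij : i ≤ j) : q[i] ≤ q[j] := by
  rcases Nat.eq_or_lt_of_le hij with rfl | hlt
  · exact le_refl _
  · exact le_of_lt (List.pairwise_iff_getElem.mp h i j hi hj hlt)

lemma aWhile_advance (S : List Int) (K : Int) (_hK : 0 ≤ K) (a b : Nat)
    (hab : a ≤ b) (hb : b < S.length)
    (heven : ∀ j : Nat, a ≤ j → j < b → pOdd (S.getD j 0) = false)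
    (hodd : pOdd (S.getD b 0) = true)
    (fuel : Nat) (hfuel : b - a < fuel) :
    aWhile S K fuel (a : Int) (K + 1) = ((b : Int) + 1, K) := by
  induction fuel generalizing a with
  | zero => omega
  | succ fuel ih =>
    have halen : a < S.length := lt_of_le_of_lt hab hb
    have hget : PySem.List.pyGet? S (a : Int) = some (S.getD a 0) := by
      rw [PySem.List.pyGet?_natCast, List.getElem?_eq_getElem halen,
          List.getD_eq_getElem _ _ halen]
    rw [aWhile, if_pos (by omega), hget]
    dsimp only
    rcases Nat.eq_or_lt_of_le hab with heq | hlt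
    · subst heq
      have hmod : PySem.Int.mod (S.getD a 0) 2 ≠ 0 := by simpa [pOdd] using hodd
      rw [if_pos hmod, aWhile_noop _ _ _ _ _ (by omega)]
      norm_num
    · have hmod : ¬ PySem.Int.mod (S.getD a 0) 2 ≠ 0 := by
        simpa [pOdd] using heven a le_rfl hlt
      rw [if_neg hmod]
      have := ih (a + 1) (by omega) (fun j h1 h2 => heven j (by omega) h2) (by omega)
      rw [show ((a : Int) + 1) = ((a + 1 : Nat) : Int) by push_cast; ring]
      exact this

theorem Ainv (S : List Int) (K : Int) (hK : 0 ≤ K) (n : Nat) (hn : n ≤ S.length) :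
    (PySem.List.pyRange 0 (n : Int) 1).foldl (aStep S K) (0, 0, 0)
      = (Lsp (oddsN S n) K, bspec S K n, Csp (oddsN S n) K) := by
  induction n with
  | zero =>
    rw [show ((0 : Nat) : Int) = 0 from rfl, PySem.List.pyRange_one_eq_nil le_rfl]
    simp [oddsN, Lsp, bspec, Csp, hK]
  | succ n ih =>
    have hn' : n < S.length := by omega
    have hcast : ((n + 1 : Nat) : Int) = (n : Int) + 1 := by push_cast; ring
    rw [hcast, PySem.List.pyRange_one_succ_right (by positivity), List.foldl_append,
        ih (by omega), List.foldl_cons, List.foldl_nil]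
    have hget : PySem.List.pyGet? S (n : Int) = some (S.getD n 0) := by
      rw [PySem.List.pyGet?_natCast, List.getElem?_eq_getElem hn', List.getD_eq_getElem _ _ hn']
    have hmle : ((oddsN S n).length : Int) ≤ (n : Int) := by exact_mod_cast oddsN_length_le S n
    rw [aStep, hget]
    dsimp only
    by_cases hOdd : pOdd (S.getD n 0) = true
    · -- S[n] odd
      have hq' : oddsN S (n + 1) = oddsN S n ++ [(n : Int)] := by rw [oddsN, if_pos hOdd]
      rw [if_pos (by simpa [pOdd] using hOdd)]
      have hlen' : ((oddsN S (n + 1)).length : Int) = ((oddsN S n).length : Int) + 1 := by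
        rw [hq', List.length_append, List.length_cons, List.length_nil]; push_cast; ring
      by_cases hm : ((oddsN S n).length : Int) + 1 ≤ K
      · -- still at most K odds: while is a no-op
        have hCs : Csp (oddsN S n) K + 1 = ((oddsN S n).length : Int) + 1 := by
          simp only [Csp]; rw [min_eq_left (by omega)]
        rw [hCs, aWhile_noop _ _ _ _ _ hm]
        have e1 : Lsp (oddsN S n) K = 0 := by simp only [Lsp]; rw [if_pos (by omega)]
        have e1' : Lsp (oddsN S (n + 1)) K = 0 := by simp only [Lsp]; rw [if_pos (by omega)]
        have e3' : Csp (oddsN S (n + 1)) K = ((oddsN S n).length : Int) + 1 := by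
          simp only [Csp]; rw [hlen', min_eq_left (by omega)]
        have e2 : bspec S K n = (n : Int) - (oddsN S n).length := by
          simp only [bspec]; rw [if_pos (by omega)]
        have e2' : bspec S K (n + 1) = ((n + 1 : Nat) : Int) - (oddsN S (n + 1)).length := by
          simp only [bspec]; rw [if_pos (by omega)]
        rw [e1, e1', e2, e2', e3']
        refine Prod.ext rfl (Prod.ext ?_ rfl)
        simp only [max_def]
        split_ifs <;> omega
      · -- window overflows: the while loop advances past one odd
        have hKm : K ≤ ((oddsN S n).length : Int) := by omega
        have hCs : Csp (oddsN S n) K + 1 = K + 1 := by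
          simp only [Csp]; rw [min_eq_right hKm]
        have hidxlt : ((((oddsN S n).length : Int) - K).toNat) < (oddsN S (n + 1)).length := by
          omega
        have hxmem : (oddsN S (n + 1))[((((oddsN S n).length : Int) - K).toNat)] ∈ oddsN S (n + 1) :=
          List.getElem_mem _
        obtain ⟨jb, hjb_lt, hjb_odd, hjb_eq⟩ := (mem_oddsN S (n + 1) _).mp hxmem
        have hjblen : jb < S.length := by omega
        have hmono := List.pairwise_iff_getElem.mp (oddsN_sorted S (n + 1))
        have hgetle := sorted_getElem_le (oddsN S (n + 1)) (oddsN_sorted S (n + 1))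
        obtain ⟨aN, haN, hP1, hP2⟩ : ∃ aN : Nat, Lsp (oddsN S n) K = (aN : Int) ∧ aN ≤ jb ∧
            (∀ j : Nat, aN ≤ j → j < jb → pOdd (S.getD j 0) = false) := by
          by_cases hmK : ((oddsN S n).length : Int) ≤ K
          · refine ⟨0, by simp only [Lsp]; rw [if_pos hmK]; simp, Nat.zero_le _, ?_⟩
            intro j _ hjlt
            by_contra hodd
            have hj' : (j : Int) ∈ oddsN S (n + 1) := (mem_oddsN S (n + 1) _).mpr
              ⟨j, by omega, by simpa using hodd, rfl⟩
            obtain ⟨jj, hjj, hje⟩ := List.mem_iff_getElem.mp hj'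
            have hidx0 : (((oddsN S n).length : Int) - K).toNat = 0 := by omega
            have := hgetle _ _ hidxlt hjj (by omega)
            rw [hjb_eq, hje] at this
            omega
          · have hi0 : ((((oddsN S n).length : Int) - K - 1).toNat) < (oddsN S n).length := by omega
            have hi0' : ((((oddsN S n).length : Int) - K - 1).toNat) < (oddsN S (n + 1)).length := by omega
            have hgq : (oddsN S n).getD ((((oddsN S n).length : Int) - K - 1).toNat) 0
                = (oddsN S (n + 1))[((((oddsN S n).length : Int) - K - 1).toNat)] := by
              rw [List.getD_eq_getElem _ _ hi0]
              simp only [hq']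
              exact (List.getElem_append_left hi0).symm
            have hnn : 0 ≤ (oddsN S (n + 1))[((((oddsN S n).length : Int) - K - 1).toNat)] :=
              (oddsN_lt S (n + 1) _ (List.getElem_mem _)).1
            have hpg : PySem.List.pyGetD (oddsN S n) (((oddsN S n).length : Int) - K - 1) 0
                = (oddsN S n).getD ((((oddsN S n).length : Int) - K - 1).toNat) 0 := by
              rw [PySem.List.pyGetD_eq_getElem _ 0 (by omega) (by omega),
                  List.getD_eq_getElem _ _ hi0]
            refine ⟨((oddsN S n).getD ((((oddsN S n).length : Int) - K - 1).toNat) 0 + 1).toNat, ?_, ?_, ?_⟩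
            · simp only [Lsp]; rw [if_neg hmK, hpg]; omega
            · have := hmono ((((oddsN S n).length : Int) - K - 1).toNat)
                ((((oddsN S n).length : Int) - K).toNat) hi0' hidxlt (by omega)
              rw [hjb_eq] at this; omega
            · intro j hjge hjlt
              by_contra hodd
              have hj' : (j : Int) ∈ oddsN S (n + 1) := (mem_oddsN S (n + 1) _).mpr
                ⟨j, by omega, by simpa using hodd, rfl⟩
              obtain ⟨jj, hjj, hje⟩ := List.mem_iff_getElem.mp hj'
              have hlow : ((((oddsN S n).length : Int) - K - 1).toNat) < jj := by
                by_contra hle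
                have := hgetle _ _ hjj hi0' (by omega)
                rw [hje] at this; omega
              have hhigh : jj < ((((oddsN S n).length : Int) - K).toNat) := by
                by_contra hle
                have := hgetle _ _ hidxlt hjj (by omega)
                rw [hje, hjb_eq] at this; omega
              omega
        rw [hCs, haN, aWhile_advance S K hK aN jb hP1 hjblen hP2 hjb_odd _ (by omega)]
        have c1 : Lsp (oddsN S (n + 1)) K = (jb : Int) + 1 := by
          simp only [Lsp]; rw [if_neg (by omega)]
          rw [show ((oddsN S (n + 1)).length : Int) - K - 1
                = ((((((oddsN S n).length : Int) - K).toNat) : Nat) : Int) by omega,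
              PySem.List.pyGetD_natCast, List.getD_eq_getElem _ _ hidxlt, hjb_eq]
        have c3 : Csp (oddsN S (n + 1)) K = K := by
          simp only [Csp]; rw [min_eq_right (by omega)]
        have e2' : bspec S K (n + 1) = wmax (oddsN S (n + 1)) ((n : Int) + 1) K := by
          simp only [bspec]; rw [if_neg (by omega), hcast]
        have hlast : wfun (oddsN S (n + 1)) ((n : Int) + 1) K (((oddsN S (n + 1)).length : Int) - K)
            = (n : Int) - (jb : Int) - K := by
          rw [wfun, show (((oddsN S (n + 1)).length : Int) - K) + K + 1
                = ((oddsN S (n + 1)).length : Int) + 1 by ring, posL_last,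
              show ((oddsN S (n + 1)).length : Int) - K
                = ((((((oddsN S n).length : Int) - K).toNat) : Nat) : Int) + 1 by omega,
              posL_succ _ _ _ (by omega), List.getD_eq_getElem _ _ hidxlt, hjb_eq]
          ring
        refine Prod.ext (by simp [c1]) (Prod.ext ?_ (by simp [c3]))
        simp only
        rw [e2', wmax_split _ _ _ hK (by omega), hlast]
        have hsnoc : ∀ B i : Int, 0 ≤ i → i + K + 1 ≤ ((oddsN S n).length : Int) + 1 →
            wfun (oddsN S (n + 1)) B K i = wfun (oddsN S n) ((n : Int)) K i := by
          intro B i h0 h1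
          rw [hq']; exact wfun_snoc _ _ _ _ _ hK h0 h1
        by_cases hmK : ((oddsN S n).length : Int) ≤ K
        · -- exactly K odds before: the prefix fold is the single whole-array window
          have e2 : bspec S K n = (n : Int) - (oddsN S n).length := by
            simp only [bspec]; rw [if_pos hmK]
          have hr : ((oddsN S (n + 1)).length : Int) - K = 0 + 1 := by omega
          rw [hr, PySem.List.pyRange_one_singleton, List.foldl_cons, List.foldl_nil]
          have w0 : wfun (oddsN S (n + 1)) ((n : Int) + 1) K 0 = (n : Int) - K := by
            rw [wfun, show (0 : Int) + K + 1 = ((K.toNat : Nat) : Int) + 1 by omega,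
                posL_succ _ _ _ (by omega), posL_zero,
                show K.toNat = (oddsN S n).length by omega, hq']
            have : ((oddsN S n) ++ [(n : Int)]).getD (oddsN S n).length 0 = (n : Int) := by
              simp [List.getD]
            rw [this]
            ring
          rw [w0, e2]
          simp only [max_def]
          split_ifs <;> omega
        · -- more than K odds: the prefix fold is the previous maximum
          have e2 : bspec S K n = wmax (oddsN S n) (n : Int) K := by
            simp only [bspec]; rw [if_neg hmK]
          have hr : ((oddsN S (n + 1)).length : Int) - K = (((oddsN S n).length : Int) - K) + 1 := by
            omega
          rw [hr, PySem.List.pyRange_one_succ_right (by omega), List.foldl_append,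
              List.foldl_cons, List.foldl_nil]
          rw [foldl_max_congr _ (wfun (oddsN S (n + 1)) ((n : Int) + 1) K) (wfun (oddsN S n) (n : Int) K) 0
                (fun i hi => by
                  rw [PySem.List.mem_pyRange_one] at hi
                  exact hsnoc _ i hi.1 (by omega))]
          rw [hsnoc _ _ (by omega) (by omega)]
          rw [e2, wmax_split _ _ _ hK (by omega)]
          simp only [max_def]
          split_ifs <;> omega
    · -- S[n] even
      have hq' : oddsN S (n + 1) = oddsN S n := by rw [oddsN, if_neg hOdd]; simp
      rw [if_neg (by simpa [pOdd] using hOdd)]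
      rw [aWhile_noop _ _ _ _ _ (show Csp (oddsN S n) K ≤ K by
            simp only [Csp]; exact min_le_right _ _)]
      rw [hq']
      refine Prod.ext rfl (Prod.ext ?_ rfl)
      by_cases hm : ((oddsN S n).length : Int) ≤ K
      · have e2 : bspec S K n = (n : Int) - (oddsN S n).length := by
          simp only [bspec]; rw [if_pos hm]
        have e2' : bspec S K (n + 1) = ((n + 1 : Nat) : Int) - (oddsN S n).length := by
          simp only [bspec]; rw [hq', if_pos hm]
        have e0 : Lsp (oddsN S n) K = 0 := by simp only [Lsp]; rw [if_pos hm]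
        have e3 : Csp (oddsN S n) K = ((oddsN S n).length : Int) := by
          simp only [Csp]; rw [min_eq_left hm]
        rw [e2, e2', e0, e3]
        simp only [max_def]
        split_ifs <;> omega
      · have hLx : PySem.List.pyGetD (oddsN S n) (((oddsN S n).length : Int) - K - 1) 0
            = (oddsN S n).getD (((oddsN S n).length : Int) - K - 1).toNat 0 := by
          rw [show (((oddsN S n).length : Int) - K - 1)
                = (((((oddsN S n).length : Int) - K - 1).toNat : Nat) : Int) by omega,
              PySem.List.pyGetD_natCast]
          simp
        have e2 : bspec S K n = wmax (oddsN S n) (n : Int) K := by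
          simp only [bspec]; rw [if_neg hm]
        have e2' : bspec S K (n + 1) = wmax (oddsN S n) ((n : Int) + 1) K := by
          simp only [bspec]; rw [hq', if_neg hm, hcast]
        have e0 : Lsp (oddsN S n) K
            = (oddsN S n).getD (((oddsN S n).length : Int) - K - 1).toNat 0 + 1 := by
          simp only [Lsp]; rw [if_neg hm, hLx]
        have e3 : Csp (oddsN S n) K = K := by
          simp only [Csp]; rw [min_eq_right (by omega)]
        rw [e2, e2', e0, e3]
        rw [wmax_split _ _ _ hK (by omega), wmax_split _ _ _ hK (by omega)]
        rw [foldl_max_congr _ (wfun (oddsN S n) (n : Int) K) (wfun (oddsN S n) ((n : Int) + 1) K) 0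
              (fun i hi => by
                rw [PySem.List.mem_pyRange_one] at hi
                exact wfun_congr _ _ _ _ _ hK hi.1 (by omega))]
        have hval : ∀ B : Int, wfun (oddsN S n) B K (((oddsN S n).length : Int) - K)
            = B - (oddsN S n).getD (((oddsN S n).length : Int) - K - 1).toNat 0 - 1 - K := by
          intro B
          set j := (((oddsN S n).length : Int) - K - 1).toNat with hjdef
          rw [wfun, show (((oddsN S n).length : Int) - K) + K + 1 = ((oddsN S n).length : Int) + 1 by ring,
              posL_last, show ((oddsN S n).length : Int) - K = ((j : Nat) : Int) + 1 by omega,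
              posL_succ _ _ _ (by omega)]
        rw [hval, hval]
        simp only [max_def]
        split_ifs <;> omega


-- ===== VERDICT (by name: the statement is the Claim_ definition above) =====
theorem longest_even_subsequence_spec : Claim_equal_longest_even_subsequence := by
  intro N K S hdom hpre
  unfold Spec_longest_even_subsequence
  obtain ⟨h1, h2⟩ := hpre
  by_cases hN : N ≤ 0
  · rw [longest_even_subsequence, PySem.List.pyRange_one_eq_nil hN,
        longest_even_subsequence_alt, if_pos hN]
    rfl
  · have hK : 0 ≤ K := by rcases h2 with h | h <;> omega
    have hNn : N = ((N.toNat : Nat) : Int) := by omega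
    have hlen : N.toNat ≤ S.length := by omega
    rw [longest_even_subsequence, hNn, Ainv S K hK N.toNat hlen,
        alt_eq_bspec S K N.toNat (by omega)]
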